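-- pv_equiv track=rewrite | github.com/yakomodo/python-homework | hashtag_5_3.py | create_hashtag
-- ===== SOURCE A (Python) =====
-- import string
--
-- def create_hashtag(text):
--     for char in string.punctuation:
--         text = text.replace(char, ' ')
--
--     words = text.split()
--     hashtag = '#' + ''.join(word.capitalize() for word in words)
--
--     if len(hashtag) > 140:
--         hashtag = hashtag[:140]
--
--     return hashtag
-- ===== SOURCE B (Python) =====
-- import string
--
-- def create_hashtag(text):
--     delims = set(string.punctuation)
--     parts = ['#']
--     buf = []
--     for ch in text:
--         if ch.isspace() or ch in delims:
--             if buf: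
--                 parts.append(''.join(buf).capitalize())
--                 buf = []
--         else:
--             buf.append(ch)
--     if buf:
--         parts.append(''.join(buf).capitalize())
--     return ''.join(parts)[:140]
-- ===== Notes on version B (the rewrite author's own statement) =====
-- stated objective: alternative
-- what changed: Replaces A's 32 full replace passes plus library split with a single left-to-right tokenizing scan that flushes a word buffer at whitespace/punctuation and builds the hashtag directly.
import Mathlib
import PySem

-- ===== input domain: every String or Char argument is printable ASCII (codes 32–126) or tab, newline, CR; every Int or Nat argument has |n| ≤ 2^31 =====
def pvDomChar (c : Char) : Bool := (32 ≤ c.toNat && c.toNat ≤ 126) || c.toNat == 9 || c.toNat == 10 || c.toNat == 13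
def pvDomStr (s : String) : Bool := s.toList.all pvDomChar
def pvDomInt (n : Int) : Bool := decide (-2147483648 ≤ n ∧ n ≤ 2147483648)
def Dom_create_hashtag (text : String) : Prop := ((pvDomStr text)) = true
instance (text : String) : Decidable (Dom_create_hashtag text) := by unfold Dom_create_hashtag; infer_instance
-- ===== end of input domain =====

-- B replaces A's 32 full replace passes + split with one left-to-right tokenizing scan (objective: alternative decomposition).

-- string.punctuation
def pvPunct : List Char := "!\"#$%&'()*+,-./:;<=>?@[\\]^_`{|}~".toList

-- str.capitalize: first char uppercased, rest lowercased (exact on ASCII, where Python's titlecase = uppercase)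
def capChars : List Char → List Char
  | [] => []
  | c :: t => PySem.Chars.upperChar c :: PySem.Chars.lower t

-- ===== PORT A =====
def pyCapitalize (s : String) : String := String.ofList (capChars s.toList)

def create_hashtag (text : String) : String :=
  let text := pvPunct.foldl (fun t c => PySem.Str.replace t (String.ofList [c]) " ") text
  let words := PySem.Str.split₀ text
  let hashtag := "#" ++ PySem.Str.join "" (words.map pyCapitalize)
  if 140 < PySem.Str.len hashtag then
    String.ofList (PySem.Chars.slice hashtag.toList none (some 140))
  else hashtag

-- ===== PORT B =====
def create_hashtag_alt (text : String) : String :=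
  let delims : PySem.Set Char := PySem.Set.ofList pvPunct
  let st := text.toList.foldl
    (fun (st : List (List Char) × List Char) ch =>
      if PySem.Chars.isspace ch || delims.contains ch then
        if st.2.isEmpty then st else (st.1 ++ [capChars st.2], [])
      else
        (st.1, st.2 ++ [ch]))
    ([['#']], [])
  let parts := if st.2.isEmpty then st.1 else st.1 ++ [capChars st.2]
  String.ofList (PySem.Chars.slice (PySem.Chars.join [] parts) none (some 140))

-- ===== PRECONDITION & SPEC =====
def Spec_create_hashtag (text : String) (out : String) : Prop := out = create_hashtag_alt text
instance (text : String) (out : String) : Decidable (Spec_create_hashtag text out) := by unfold Spec_create_hashtag; infer_instance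

-- ===== CLAIM (what is proved, stated in full; the proofs are below) =====
def Claim_equal_create_hashtag : Prop := ∀ (text : String), Dom_create_hashtag text → Spec_create_hashtag text (create_hashtag text)

-- ===== LEMMAS AND PROOFS =====

-- delimiter predicate shared by both characterizations
def pvDelim (c : Char) : Bool := PySem.Chars.isspace c || pvPunct.contains c

-- what each single replace pass does to one char
def pvRep (c : Char) : Char := if pvPunct.contains c then ' ' else c

-- the common tokenizer spec: split l into maximal runs of non-delimiter chars (buf = current run so far)
def pvToks : List Char → List Char → List (List Char)
  | [], buf => if buf.isEmpty then [] else [buf]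
  | c :: l, buf =>
    if pvDelim c then (if buf.isEmpty then pvToks l [] else buf :: pvToks l [])
    else pvToks l (buf ++ [c])

theorem pvRep_isspace (c : Char) : PySem.Chars.isspace (pvRep c) = pvDelim c := by
  unfold pvRep pvDelim
  by_cases h : pvPunct.contains c = true
  · rw [if_pos h, h, Bool.or_true]
    decide
  · have hf : pvPunct.contains c = false := by
      rw [Bool.eq_false_iff]; exact h
    rw [if_neg h, hf, Bool.or_false]

theorem pvRep_id (c : Char) (h : pvDelim c = false) : pvRep c = c := by
  unfold pvDelim at h
  rw [Bool.or_eq_false_iff] at h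
  unfold pvRep
  have hne : ¬ pvPunct.contains c = true := by rw [h.2]; simp
  rw [if_neg hne]

theorem replace_go_single (a : Char) :
    ∀ (l : List Char) (n : Nat) (acc : List Char), l.length ≤ n →
      PySem.Chars.replace.go [a] [' '] n l acc
        = acc.reverse ++ l.map (fun c => if c = a then ' ' else c) := by
  intro l
  induction l with
  | nil => intro n acc _; cases n <;> simp [PySem.Chars.replace.go]
  | cons c t ih =>
    intro n acc hn
    cases n with
    | zero => simp at hn
    | succ m =>
      simp only [List.length_cons, Nat.succ_le_succ_iff] at hn
      by_cases hca : a = c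
      · subst hca
        have hpre : List.isPrefixOf [a] (a :: t) = true := by simp [List.isPrefixOf]
        simp only [PySem.Chars.replace.go, hpre, if_pos, List.length_cons, List.length_nil,
          List.drop_succ_cons, List.drop_zero, List.reverse_cons, List.reverse_nil,
          List.nil_append]
        rw [ih _ _ hn]
        simp
      · have hpre : List.isPrefixOf [a] (c :: t) = false := by
          simp [List.isPrefixOf, hca]
        simp only [PySem.Chars.replace.go, hpre, Bool.false_eq_true, if_neg, not_false_iff]
        rw [ih _ _ hn]
        simp [Ne.symm hca]

theorem replace_single (a : Char) (l : List Char) :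
    PySem.Chars.replace l [a] [' '] = l.map (fun c => if c = a then ' ' else c) := by
  unfold PySem.Chars.replace
  simp only [List.isEmpty_cons, Bool.false_eq_true, if_neg, not_false_iff]
  simpa using replace_go_single a l l.length [] le_rfl

theorem fold_replace (ps : List Char) :
    ∀ (cs : List Char),
      ps.foldl (fun t a => t.map (fun c => if c = a then ' ' else c)) cs
        = cs.map (fun c => if ps.contains c then ' ' else c) := by
  induction ps with
  | nil => intro cs; simp
  | cons a ps ih =>
    intro cs
    simp only [List.foldl_cons]
    rw [ih, List.map_map]
    apply List.map_congr_left
    intro c _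
    simp only [Function.comp]
    by_cases hca : c = a
    · subst hca
      have : pvPunct.contains ' ' = false := by decide
      by_cases h : ps.contains ' ' = true <;> simp [h]
    · simp [hca]

theorem split_go_toks :
    ∀ (l cur : List Char) (acc : List (List Char)),
      PySem.Chars.split₀.go (l.map pvRep) cur acc = acc.reverse ++ pvToks l cur.reverse := by
  intro l
  induction l with
  | nil =>
    intro cur acc
    simp only [List.map_nil, PySem.Chars.split₀.go, pvToks]
    by_cases h : cur = []
    · simp [h]
    · simp [List.isEmpty_iff, h]
  | cons c l ih =>
    intro cur acc
    simp only [List.map_cons, PySem.Chars.split₀.go, pvRep_isspace, pvToks]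
    by_cases hd : pvDelim c = true
    · simp only [hd, if_pos]
      by_cases hc : cur = []
      · simp [hc, ih]
      · simp only [List.isEmpty_iff, hc, if_neg, not_false_iff,
          List.reverse_eq_nil_iff]
        rw [ih [] (cur.reverse :: acc)]
        simp
    · simp only [Bool.not_eq_true] at hd
      rw [pvRep_id c hd]
      simp only [hd, Bool.false_eq_true, if_neg, not_false_iff]
      rw [ih (c :: cur) acc]
      simp

theorem join_nil_flatten (xs : List (List Char)) :
    PySem.Chars.join [] xs = xs.flatten := by
  unfold PySem.Chars.join
  induction xs with
  | nil => simp [List.intercalate]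
  | cons x xs ih =>
    cases xs with
    | nil => simp [List.intercalate]
    | cons y ys =>
      simp only [List.intercalate, List.intersperse] at ih ⊢
      simp_all [List.flatten]

-- A's result, characterized
theorem create_hashtag_chars (text : String) :
    create_hashtag text
      = String.ofList (('#' :: ((pvToks text.toList []).map capChars).flatten).take 140) := by
  unfold create_hashtag
  have hrep : (pvPunct.foldl (fun t c => PySem.Str.replace t (String.ofList [c]) " ") text).toList
      = text.toList.map pvRep := by
    have : ∀ (ps : List Char) (s : String),
        (ps.foldl (fun t c => PySem.Str.replace t (String.ofList [c]) " ") s).toList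
          = ps.foldl (fun t a => t.map (fun c => if c = a then ' ' else c)) s.toList := by
      intro ps
      induction ps with
      | nil => intro s; simp
      | cons a ps ih =>
        intro s
        simp only [List.foldl_cons]
        rw [ih]
        congr 1
        simp [PySem.Str.replace, replace_single]
    rw [this, fold_replace]
    rfl
  have hwords : PySem.Chars.split₀ (text.toList.map pvRep) = pvToks text.toList [] := by
    unfold PySem.Chars.split₀
    simpa using split_go_toks text.toList [] []
  have hhash :
      ("#" ++ PySem.Str.join "" ((PySem.Str.split₀
          (pvPunct.foldl (fun t c => PySem.Str.replace t (String.ofList [c]) " ") text)).map pyCapitalize)).toList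
        = '#' :: ((pvToks text.toList []).map capChars).flatten := by
    have h0 : ("" : String).toList = [] := rfl
    simp only [PySem.Str.split₀, hrep, hwords, PySem.Str.join, String.toList_append, h0,
      String.toList_ofList]
    rw [join_nil_flatten]
    have h1 : ("#" : String).toList = ['#'] := rfl
    have hmap : (((pvToks text.toList []).map String.ofList).map pyCapitalize).map String.toList
        = (pvToks text.toList []).map capChars := by
      rw [List.map_map, List.map_map]
      apply List.map_congr_left
      intro w _
      simp [Function.comp_def, pyCapitalize, String.toList_ofList]
    rw [h1, List.singleton_append, hmap]
  simp only [PySem.Str.len]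
  rw [PySem.Chars.slice_eq_listSlice, PySem.List.slice_to _ (by norm_num : (0:Int) ≤ 140)]
  by_cases h : (140:Int) < (("#" ++ PySem.Str.join "" ((PySem.Str.split₀
      (pvPunct.foldl (fun t c => PySem.Str.replace t (String.ofList [c]) " ") text)).map pyCapitalize)).toList.length : Int)
  · simp only [h, if_pos]
    rw [hhash, show Int.toNat 140 = 140 from rfl]
  · simp only [h, if_neg, not_false_iff]
    have hle : ('#' :: ((pvToks text.toList []).map capChars).flatten).length ≤ 140 := by
      rw [← hhash]; push_cast at h; omega
    rw [List.take_of_length_le hle, ← hhash]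
    exact String.ofList_toList.symm

-- B's fold, characterized
theorem fold_toks :
    ∀ (l : List Char) (parts : List (List Char)) (buf : List Char),
      (let st := l.foldl
        (fun (st : List (List Char) × List Char) ch =>
          if PySem.Chars.isspace ch || PySem.Set.contains pvPunct ch then
            if st.2.isEmpty then st else (st.1 ++ [capChars st.2], [])
          else
            (st.1, st.2 ++ [ch])) (parts, buf)
       if st.2.isEmpty then st.1 else st.1 ++ [capChars st.2])
        = parts ++ (pvToks l buf).map capChars := by
  intro l
  induction l with
  | nil =>
    intro parts buf
    simp only [List.foldl_nil, pvToks]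
    by_cases h : buf.isEmpty = true <;> simp [h]
  | cons c l ih =>
    intro parts buf
    have hdel : (PySem.Chars.isspace c || PySem.Set.contains pvPunct c) = pvDelim c := rfl
    simp only [List.foldl_cons, hdel, pvToks]
    by_cases hd : pvDelim c = true
    · simp only [hd, if_pos]
      by_cases hb : buf.isEmpty = true
      · have : buf = [] := List.isEmpty_iff.mp hb
        subst this
        simpa using ih parts []
      · simp only [hb, Bool.false_eq_true, if_neg, not_false_iff]
        rw [ih (parts ++ [capChars buf]) []]
        simp
    · simp only [hd, Bool.false_eq_true, if_neg, not_false_iff]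
      exact ih parts (buf ++ [c])

theorem create_hashtag_alt_chars (text : String) :
    create_hashtag_alt text
      = String.ofList (('#' :: ((pvToks text.toList []).map capChars).flatten).take 140) := by
  unfold create_hashtag_alt
  have hnd : pvPunct.Nodup := by decide
  have hset : PySem.Set.ofList pvPunct = pvPunct :=
    PySem.Set.ofList_eq_self_of_nodup pvPunct hnd
  simp only [hset]
  have hfold := fold_toks text.toList [['#']] []
  simp only at hfold
  rw [PySem.Chars.slice_eq_listSlice, PySem.List.slice_to _ (by norm_num : (0:Int) ≤ 140),
    join_nil_flatten, show Int.toNat 140 = 140 from rfl]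
  rw [hfold]
  simp

-- ===== VERDICT (by name: the statement is the Claim_ definition above) =====
theorem create_hashtag_spec : Claim_equal_create_hashtag := by
  intro text _
  unfold Spec_create_hashtag
  rw [create_hashtag_chars, create_hashtag_alt_chars]
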